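-- pv_equiv track=rewrite | github.com/astryx-ai/astryx-ai-microservice-v2 | app/services/agent_tools/formatter.py | _detect_duplicate_sections
-- ===== SOURCE A (Python) =====
-- def _detect_duplicate_sections(content: str) -> bool:
--     """Detect if content has obvious duplicate sections."""
--     lines = content.split('\n')
--     # Look for repeated headings or sections
--     headings = [line.strip() for line in lines if line.strip() and (line.startswith('#') or line.isupper() or 'Executive Summary' in line or 'Company/Market Overview' in line)]
--
--     # Check for repeated headings
--     seen_headings = set()
--     for heading in headings:
--         normalized = heading.lower().strip('#').strip()
--         if normalized in seen_headings and len(normalized) > 10: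
--             return True
--         seen_headings.add(normalized)
--
--     return False
-- ===== SOURCE B (Python) =====
-- def _detect_duplicate_sections(content: str) -> bool:
--     """Detect if content has obvious duplicate sections."""
--     norms = sorted(
--         line.strip().lower().strip('#').strip()
--         for line in content.split('\n')
--         if line.strip() and (line.startswith('#') or line.isupper()
--                              or 'Executive Summary' in line
--                              or 'Company/Market Overview' in line)
--     )
--     return any(a == b and len(a) > 10 for a, b in zip(norms, norms[1:]))
-- ===== Notes on version B (the rewrite author's own statement) =====
-- stated objective: alternative
-- what changed: Replaces A's seen-set scan with early return by sorting the normalized headings and scanning adjacent pairs for an equal pair longer than 10 chars; correct because sorting makes all duplicates adjacent.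
import Mathlib
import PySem

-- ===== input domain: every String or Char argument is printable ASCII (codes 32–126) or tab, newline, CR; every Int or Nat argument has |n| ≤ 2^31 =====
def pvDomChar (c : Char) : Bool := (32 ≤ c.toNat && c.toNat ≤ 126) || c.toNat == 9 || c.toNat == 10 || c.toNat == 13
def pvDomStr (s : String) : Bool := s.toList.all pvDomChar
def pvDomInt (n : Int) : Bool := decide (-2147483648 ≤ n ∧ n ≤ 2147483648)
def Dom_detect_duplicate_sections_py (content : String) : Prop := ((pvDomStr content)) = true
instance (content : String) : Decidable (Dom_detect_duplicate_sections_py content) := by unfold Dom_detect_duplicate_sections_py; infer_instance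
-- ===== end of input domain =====

-- B replaces A's seen-set early-exit scan with sort-then-adjacent-scan: it sorts the
-- normalized headings and looks for an equal adjacent pair (alternative decomposition).

-- ===== PORT A =====
-- str.isupper() ported by hand (no PySem primitive): at least one cased character and no
-- lowercase one; exact on the ASCII domain, where the cased characters are the letters.
def pvStrIsupper (s : String) : Bool :=
  s.toList.any (fun c => PySem.Chars.isupper c || PySem.Chars.islower c) &&
  s.toList.all (fun c => ! PySem.Chars.islower c)

-- the heading filter predicate of A's comprehension (Source B's `if` uses the same predicate)
def pvHeadingLine (line : String) : Bool :=
  (PySem.Str.strip line != "") &&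
  (PySem.Str.startswith line "#" || pvStrIsupper line ||
   PySem.Str.isIn "Executive Summary" line || PySem.Str.isIn "Company/Market Overview" line)

-- heading.lower().strip('#').strip()
def pvNormalize (h : String) : String :=
  PySem.Str.strip (PySem.Str.stripChars (PySem.Str.lower h) "#")

-- A's for-loop with the early return and the `seen_headings` set
def pvALoop : List String → PySem.Set String → Bool
  | [], _ => false
  | h :: rest, seen =>
    if seen.contains (pvNormalize h) && decide (10 < PySem.Str.len (pvNormalize h)) then true
    else pvALoop rest (seen.add (pvNormalize h))

def detect_duplicate_sections_py (content : String) : Bool :=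
  let lines := (PySem.Str.split? content "\n").getD []   -- sep ≠ "" so split? is `some`
  let headings := (lines.filter pvHeadingLine).map PySem.Str.strip
  pvALoop headings PySem.Set.empty

-- ===== PORT B =====
-- line.strip().lower().strip('#').strip()
def pvBNorm (line : String) : String :=
  PySem.Str.strip (PySem.Str.stripChars (PySem.Str.lower (PySem.Str.strip line)) "#")

def detect_duplicate_sections_py_alt (content : String) : Bool :=
  let norms := PySem.List.sorted
    ((((PySem.Str.split? content "\n").getD []).filter pvHeadingLine).map pvBNorm)
    (fun x => x) false
  (norms.zip (PySem.List.slice norms (some 1) none)).any    -- zip(norms, norms[1:])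
    (fun p => (p.1 == p.2) && decide (10 < PySem.Str.len p.1))

-- ===== PRECONDITION & SPEC =====
def Spec_detect_duplicate_sections_py (content : String) (out : Bool) : Prop := out = detect_duplicate_sections_py_alt content
instance (content : String) (out : Bool) : Decidable (Spec_detect_duplicate_sections_py content out) := by unfold Spec_detect_duplicate_sections_py; infer_instance

-- ===== CLAIM (what is proved, stated in full; the proofs are below) =====
def Claim_equal_detect_duplicate_sections_py : Prop := ∀ (content : String), Dom_detect_duplicate_sections_py content → Spec_detect_duplicate_sections_py content (detect_duplicate_sections_py content)

-- ===== LEMMAS AND PROOFS =====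

-- characterization of A's early-exit scan
theorem pvALoop_iff (hs : List String) :
    ∀ (seen : PySem.Set String),
      pvALoop hs seen = true ↔
        ∃ x, 10 < PySem.Str.len x ∧
          ((x ∈ seen ∧ x ∈ hs.map pvNormalize) ∨ 2 ≤ (hs.map pvNormalize).count x) := by
  induction hs with
  | nil => intro seen; simp [pvALoop]
  | cons a t ih =>
    intro seen
    simp only [pvALoop]
    by_cases hg : (PySem.Set.contains seen (pvNormalize a) && decide (10 < PySem.Str.len (pvNormalize a))) = true
    · rw [if_pos hg]
      rw [Bool.and_eq_true, decide_eq_true_iff, PySem.Set.contains_iff] at hg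
      exact iff_of_true rfl ⟨pvNormalize a, hg.2, Or.inl ⟨hg.1, by simp⟩⟩
    · rw [if_neg hg]
      have hg' : pvNormalize a ∈ seen → ¬ (10 < PySem.Str.len (pvNormalize a)) := by
        intro hmem hlen
        exact hg (by rw [Bool.and_eq_true, decide_eq_true_iff]
                     exact ⟨(PySem.Set.contains_iff seen (pvNormalize a)).2 hmem, hlen⟩)
      rw [ih]
      constructor
      · rintro ⟨x, hlen, hc⟩
        refine ⟨x, hlen, ?_⟩
        rcases hc with ⟨hmem, hin⟩ | hcnt
        · rw [PySem.Set.mem_add] at hmem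
          rcases hmem with hmem | rfl
          · exact Or.inl ⟨hmem, by simp [hin]⟩
          · right
            have h1 : 1 ≤ (t.map pvNormalize).count (pvNormalize a) := List.count_pos_iff.2 hin
            simp only [List.map_cons, List.count_cons, beq_self_eq_true, if_true]
            omega
        · right
          simp only [List.map_cons, List.count_cons]
          omega
      · rintro ⟨x, hlen, hc⟩
        refine ⟨x, hlen, ?_⟩
        rcases hc with ⟨hmem, hin⟩ | hcnt
        · simp only [List.map_cons, List.mem_cons] at hin
          rcases hin with rfl | hin
          · exact absurd hlen (hg' hmem)
          · exact Or.inl ⟨(PySem.Set.mem_add seen _ x).2 (Or.inl hmem), hin⟩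
        · simp only [List.map_cons, List.count_cons] at hcnt
          by_cases hx : x = pvNormalize a
          · subst hx
            simp only [beq_self_eq_true, if_true] at hcnt
            by_cases hin : pvNormalize a ∈ t.map pvNormalize
            · exact Or.inl ⟨(PySem.Set.mem_add seen _ _).2 (Or.inr rfl), hin⟩
            · rw [List.count_eq_zero_of_not_mem hin] at hcnt; omega
          · right
            have hb : (pvNormalize a == x) = false := by
              simp only [beq_eq_false_iff_ne, ne_eq]
              exact fun h => hx h.symm
            rw [hb] at hcnt
            simpa using hcnt

theorem pv_empty_not_mem (x : String) : x ∉ (PySem.Set.empty : PySem.Set String) :=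
  List.count_eq_zero.mp rfl

-- in a ≤-sorted list, an adjacent equal pair (with q) exists iff some element (with q)
-- occurs at least twice
theorem pv_adj_dup (q : String → Bool) :
    ∀ (l : List String), l.Pairwise (· ≤ ·) →
      ((l.zip l.tail).any (fun p => (p.1 == p.2) && q p.1) = true ↔
        ∃ x, q x = true ∧ 2 ≤ l.count x) := by
  intro l
  induction l with
  | nil => intro _; simp
  | cons a t ih =>
    intro hp
    have hpt : t.Pairwise (· ≤ ·) := hp.tail
    have hle : ∀ y ∈ t, a ≤ y := fun y hy => (List.pairwise_cons.1 hp).1 y hy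
    cases t with
    | nil =>
      refine iff_of_false (by simp) ?_
      rintro ⟨x, _, hc⟩
      have h1 : List.count x [a] ≤ 1 := by
        simp only [List.count_cons, List.count_nil]
        split <;> omega
      omega
    | cons b t' =>
      have ih' := ih hpt
      simp only [List.tail_cons] at ih' ⊢
      rw [List.zip_cons_cons, List.any_cons, Bool.or_eq_true, ih']
      constructor
      · rintro (hab | ⟨x, hq, hc⟩)
        · rw [Bool.and_eq_true, beq_iff_eq] at hab
          obtain ⟨hab1, hq⟩ := hab
          have hab1' : a = b := hab1
          have hq' : q a = true := hq
          subst hab1'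
          exact ⟨a, hq', by simp⟩
        · refine ⟨x, hq, ?_⟩
          rw [List.count_cons]
          split <;> omega
      · rintro ⟨x, hq, hc⟩
        by_cases hax : a = x
        · subst hax
          rw [List.count_cons, beq_self_eq_true, if_pos rfl] at hc
          have hmem : a ∈ b :: t' := List.count_pos_iff.1 (by omega)
          have hab : a ≤ b := hle b (by simp)
          have hba : b ≤ a := by
            rcases List.mem_cons.1 hmem with rfl | hmem'
            · exact le_refl _
            · exact (List.pairwise_cons.1 hpt).1 a hmem'
          have hE : a = b := le_antisymm hab hba
          exact Or.inl (by rw [Bool.and_eq_true, beq_iff_eq]; exact ⟨hE, hq⟩)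
        · right
          have hb : (a == x) = false := beq_eq_false_iff_ne.2 hax
          refine ⟨x, hq, ?_⟩
          rw [List.count_cons, hb] at hc
          simpa using hc

-- ===== VERDICT (by name: the statement is the Claim_ definition above) =====
theorem detect_duplicate_sections_py_spec : Claim_equal_detect_duplicate_sections_py := by
  unfold Claim_equal_detect_duplicate_sections_py
  intro content _
  unfold Spec_detect_duplicate_sections_py
  simp only [detect_duplicate_sections_py, detect_duplicate_sections_py_alt]
  set lines := (PySem.Str.split? content "\n").getD [] with hlines
  set ns := (lines.filter pvHeadingLine).map pvBNorm with hns
  set srt := PySem.List.sorted ns (fun x => x) false with hsrt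
  have hperm : srt.Perm ns := PySem.List.sorted_perm ns (fun x => x) false
  have hpw : srt.Pairwise (· ≤ ·) := by
    have := PySem.List.sorted_pairwise ns (fun x => x)
    simpa using this
  have hmap : ((lines.filter pvHeadingLine).map PySem.Str.strip).map pvNormalize = ns := by
    rw [List.map_map]; rfl
  rw [PySem.List.slice_from_one srt]
  have hB := pv_adj_dup (fun x => decide (10 < PySem.Str.len x)) srt hpw
  cases hA : pvALoop ((lines.filter pvHeadingLine).map PySem.Str.strip) PySem.Set.empty with
  | false =>
    symm
    rw [Bool.eq_false_iff]
    intro htrue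
    obtain ⟨x, hq, hc⟩ := hB.1 htrue
    rw [hperm.count_eq] at hc
    have htr : pvALoop ((lines.filter pvHeadingLine).map PySem.Str.strip) PySem.Set.empty = true := by
      rw [pvALoop_iff, hmap]
      exact ⟨x, by simpa using hq, Or.inr hc⟩
    rw [hA] at htr
    exact absurd htr (by simp)
  | true =>
    symm
    rw [pvALoop_iff, hmap] at hA
    obtain ⟨x, hlen, hc⟩ := hA
    rcases hc with ⟨hmem, _⟩ | hcnt
    · exact absurd hmem (pv_empty_not_mem x)
    · exact hB.2 ⟨x, by simpa using hlen, by rw [hperm.count_eq]; exact hcnt⟩
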